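-- pv_equiv track=rewrite | github.com/e-dorigatti/e-dorigatti.github.io | attachments/tenxor_part_1.py | index_to_position
-- ===== SOURCE A (Python) =====
-- from typing import Any, Callable, List, Optional, Sequence, Tuple
--
-- def index_to_position(idx: int, shape: List[int]) -> int:
--     """
--     Finds the position in the multi-dimensional tensor corresponding to
--     the element at the given index in the flattened array.
--     """
--
--     # we could make this function more efficient by pre-computing this
--     # and storing it in the Tenxor
--     slice_sizes = [1] * len(shape)
--     for k in range(len(shape) - 1, 0, -1):
--         slice_sizes[k - 1] *= shape[k] * slice_sizes[k]
--
--     pos = [0] * len(shape)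
--     for k in range(len(shape)):
--         pos[k] = idx // slice_sizes[k]
--         idx = idx % slice_sizes[k]
--
--         if pos[k] >= shape[k]:
--             raise RuntimeError(
--                 f"index {pos[k]} at position {k} out of bounds"
--                 f" for slice size {slice_sizes[k]}"
--             )
--
--     return pos
-- ===== SOURCE B (Python) =====
-- def index_to_position(idx, shape):
--     """
--     Finds the position in the multi-dimensional tensor corresponding to
--     the element at the given index in the flattened array.
--
--     Single right-to-left divmod chain: peel off the last coordinates
--     first, so no stride table is ever built.
--     """
--     if not shape:
--         return []
--     pos = []
--     for s in reversed(shape[1:]):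
--         idx, r = divmod(idx, s)
--         pos.append(r)
--     if idx >= shape[0]:
--         raise RuntimeError(f"index {idx} at position 0 out of bounds")
--     return [idx] + pos[::-1]
-- ===== Notes on version B (the rewrite author's own statement) =====
-- stated objective: simpler
-- what changed: Replaces A's precomputed stride table plus a second indexing loop by a single right-to-left divmod chain over the trailing dimensions, so no slice_sizes array is ever built.
-- outside the precondition, e.g. on index_to_position(-5, [-2]): A returns [-5], B returns [-5]
import Mathlib
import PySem

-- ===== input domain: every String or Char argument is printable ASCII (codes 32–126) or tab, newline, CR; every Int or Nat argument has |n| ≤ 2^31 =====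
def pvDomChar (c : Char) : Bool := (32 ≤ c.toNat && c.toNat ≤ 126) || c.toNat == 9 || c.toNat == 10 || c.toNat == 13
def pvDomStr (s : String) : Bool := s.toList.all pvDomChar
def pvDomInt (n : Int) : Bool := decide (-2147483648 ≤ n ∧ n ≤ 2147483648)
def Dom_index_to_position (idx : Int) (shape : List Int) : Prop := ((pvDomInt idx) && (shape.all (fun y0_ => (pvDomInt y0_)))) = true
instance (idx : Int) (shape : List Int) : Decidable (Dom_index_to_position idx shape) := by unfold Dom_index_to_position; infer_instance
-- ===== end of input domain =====

-- B replaces A's stride table + second loop by one right-to-left divmod chain (simpler: one pass, no table).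
-- A's RuntimeError branch (and the ZeroDivisionError on zero strides) lies outside Pre_; the ports carry the loops without it.

-- ===== PORT A =====
def index_to_position (idx : Int) (shape : List Int) : List Int :=
  -- slice_sizes = [1] * len(shape); for k in range(len(shape)-1, 0, -1): slice_sizes[k-1] *= shape[k] * slice_sizes[k]
  let slice_sizes : List Int :=
    (PySem.List.pyRange ((shape.length : Int) - 1) 0 (-1)).foldl
      (fun ss k => PySem.List.pySetD ss (k - 1)
        (PySem.List.pyGetD ss (k - 1) 0 * (PySem.List.pyGetD shape k 0 * PySem.List.pyGetD ss k 0)))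
      (List.replicate shape.length 1)
  -- pos = [0]*len(shape); for k in range(len(shape)): pos[k] = idx // ss[k]; idx = idx % ss[k]
  -- (the 'pos[k] >= shape[k]' RuntimeError branch is excluded by Pre_)
  let st :=
    (PySem.List.pyRange 0 (shape.length : Int) 1).foldl
      (fun (st : Int × List Int) k =>
        (PySem.Int.mod st.1 (PySem.List.pyGetD slice_sizes k 0),
         PySem.List.pySetD st.2 k (PySem.Int.floordiv st.1 (PySem.List.pyGetD slice_sizes k 0))))
      (idx, List.replicate shape.length 0)
  st.2

-- ===== PORT B =====
def index_to_position_alt (idx : Int) (shape : List Int) : List Int :=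
  match shape with
  | [] => []
  | _s0 :: rest =>
    -- pos = []; for s in reversed(shape[1:]): idx, r = divmod(idx, s); pos.append(r)
    let st := (rest.reverse).foldl
      (fun (st : Int × List Int) s =>
        (PySem.Int.floordiv st.1 s, st.2 ++ [PySem.Int.mod st.1 s]))
      (idx, [])
    -- (the 'idx >= shape[0]' RuntimeError is excluded by Pre_)
    st.1 :: st.2.reverse

-- ===== PRECONDITION & SPEC =====
-- Pre_ excludes shapes containing a non-positive dimension size (there A either hits ZeroDivisionError /
-- RuntimeError or, for meaningless negative sizes, returns an accidental value) and flat indices idx ≥ prod(shape)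
-- on a nonempty shape (there A raises RuntimeError).
def Pre_index_to_position (idx : Int) (shape : List Int) : Prop :=
  (∀ s ∈ shape, 0 < s) ∧ (shape ≠ [] → idx < shape.prod)
instance (idx : Int) (shape : List Int) : Decidable (Pre_index_to_position idx shape) := by
  unfold Pre_index_to_position; infer_instance

def pvWitness_index_to_position : Int × List Int := (7, [2, 3, 4])

def Spec_index_to_position (idx : Int) (shape : List Int) (out : List Int) : Prop := out = index_to_position_alt idx shape
instance (idx : Int) (shape : List Int) (out : List Int) : Decidable (Spec_index_to_position idx shape out) := by unfold Spec_index_to_position; infer_instance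

-- ===== CLAIM (what is proved, stated in full; the proofs are below) =====
def Claim_equal_index_to_position : Prop := ∀ (idx : Int) (shape : List Int), Dom_index_to_position idx shape → Pre_index_to_position idx shape → Spec_index_to_position idx shape (index_to_position idx shape)

-- ===== LEMMAS AND PROOFS =====

-- The common mathematical skeleton: mixed-radix digits by leading strides.
def pvDigits (idx : Int) : List Int → List Int
  | [] => []
  | _ :: rest => PySem.Int.floordiv idx rest.prod :: pvDigits (PySem.Int.mod idx rest.prod) rest

-- suffix products: pvSP shape = [prod shape[1:], …, 1] (A's final slice_sizes)
def pvSP : List Int → List Int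
  | [] => []
  | _ :: rest => rest.prod :: pvSP rest

-- index shifting across a cons cell, for positive Python indices
theorem pvGetD_cons (c : Int) (ss : List Int) (i : Int) (d : Int) (h : 1 ≤ i) :
    PySem.List.pyGetD (c :: ss) i d = PySem.List.pyGetD ss (i - 1) d := by
  rw [PySem.List.pyGetD_of_nonneg _ _ (by omega), PySem.List.pyGetD_of_nonneg _ _ (by omega),
    show i.toNat = (i - 1).toNat + 1 by omega]
  rfl

theorem pvSetD_cons (c : Int) (ss : List Int) (i : Int) (v : Int) (h : 1 ≤ i) :
    PySem.List.pySetD (c :: ss) i v = c :: PySem.List.pySetD ss (i - 1) v := by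
  rw [PySem.List.pySetD_of_nonneg _ _ (by omega), PySem.List.pySetD_of_nonneg _ _ (by omega),
    show i.toNat = (i - 1).toNat + 1 by omega]
  rfl

theorem pvRange_shift (a b : Int) :
    PySem.List.pyRange (a + 1) (b + 1) 1 = (PySem.List.pyRange a b 1).map (fun k => k + 1) := by
  simp only [PySem.List.pyRange_one, List.map_map, show b + 1 - (a + 1) = b - a by ring]
  exact List.map_congr_left (fun k _ => by simp [Function.comp]; ring)

-- ===== A, first loop: slice_sizes = suffix products =====

theorem pvSS_shift (s0 : Int) (rest : List Int) (R : List Int) (hR : ∀ k ∈ R, 1 ≤ k)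
    (c : Int) (X : List Int) :
    R.foldr (fun k ss => PySem.List.pySetD ss (k + 1 - 1)
        (PySem.List.pyGetD ss (k + 1 - 1) 0 *
          (PySem.List.pyGetD (s0 :: rest) (k + 1) 0 * PySem.List.pyGetD ss (k + 1) 0))) (c :: X)
    = c :: R.foldr (fun k ss => PySem.List.pySetD ss (k - 1)
        (PySem.List.pyGetD ss (k - 1) 0 *
          (PySem.List.pyGetD rest k 0 * PySem.List.pyGetD ss k 0))) X := by
  induction R with
  | nil => rfl
  | cons k R' ih =>
    have hk : 1 ≤ k := hR k (by simp)
    simp only [List.foldr_cons, ih (fun x hx => hR x (by simp [hx]))]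
    rw [show k + 1 - 1 = k by ring, pvSetD_cons _ _ _ _ (by omega),
      pvGetD_cons _ _ k _ (by omega), pvGetD_cons c _ (k + 1) _ (by omega),
      pvGetD_cons s0 rest (k + 1) _ (by omega), show k + 1 - 1 = k by ring]

theorem pvSS_foldr : ∀ (shape : List Int),
    (PySem.List.pyRange 1 (shape.length : Int) 1).foldr
      (fun k ss => PySem.List.pySetD ss (k - 1)
        (PySem.List.pyGetD ss (k - 1) 0 *
          (PySem.List.pyGetD shape k 0 * PySem.List.pyGetD ss k 0)))
      (List.replicate shape.length 1) = pvSP shape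
  | [] => by simp [PySem.List.pyRange_one_eq_nil, pvSP]
  | [s0] => by simp [PySem.List.pyRange_one_eq_nil, pvSP]
  | s0 :: r0 :: rest' => by
    have hcons : PySem.List.pyRange 1 ((s0 :: r0 :: rest').length : Int) 1
        = 1 :: (PySem.List.pyRange 1 ((r0 :: rest').length : Int) 1).map (fun k => k + 1) := by
      rw [show ((s0 :: r0 :: rest').length : Int) = ((r0 :: rest').length : Int) + 1 by simp,
        PySem.List.pyRange_one_cons (by simp)]
      congr 1
      exact pvRange_shift 1 ((r0 :: rest').length : Int)
    rw [hcons, show List.replicate (s0 :: r0 :: rest').length (1 : Int)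
        = 1 :: List.replicate (r0 :: rest').length 1 from rfl]
    simp only [List.foldr_cons, List.foldr_map]
    rw [pvSS_shift s0 (r0 :: rest') (PySem.List.pyRange 1 ((r0 :: rest').length : Int) 1)
        (fun k hk => ((PySem.List.mem_pyRange_one).1 hk).1) 1
        (List.replicate (r0 :: rest').length 1),
      pvSS_foldr (r0 :: rest')]
    rw [pvGetD_cons 1 (pvSP (r0 :: rest')) 1 0 le_rfl,
      pvGetD_cons s0 (r0 :: rest') 1 0 le_rfl,
      show pvSP (r0 :: rest') = rest'.prod :: pvSP rest' from rfl]
    norm_num [PySem.List.pyGetD_zero_cons, PySem.List.pySetD_of_nonneg, pvSP]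

theorem pvSS_eq (shape : List Int) :
    (PySem.List.pyRange ((shape.length : Int) - 1) 0 (-1)).foldl
      (fun ss k => PySem.List.pySetD ss (k - 1)
        (PySem.List.pyGetD ss (k - 1) 0 *
          (PySem.List.pyGetD shape k 0 * PySem.List.pyGetD ss k 0)))
      (List.replicate shape.length 1) = pvSP shape := by
  rw [PySem.List.pyRange_neg_one_eq_reverse, List.foldl_reverse,
    show (shape.length : Int) - 1 + 1 = (shape.length : Int) by ring,
    show (0 : Int) + 1 = 1 by ring]
  exact pvSS_foldr shape

-- ===== A, second loop: the position loop computes pvDigits =====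

theorem pvPos_shift (P0 : Int) (SP : List Int) (R : List Int) (hR : ∀ k ∈ R, 0 ≤ k) :
    ∀ (i p0 : Int) (pos : List Int),
    R.foldl (fun (st : Int × List Int) k =>
        (PySem.Int.mod st.1 (PySem.List.pyGetD (P0 :: SP) (k + 1) 0),
         PySem.List.pySetD st.2 (k + 1) (PySem.Int.floordiv st.1 (PySem.List.pyGetD (P0 :: SP) (k + 1) 0))))
      (i, p0 :: pos)
    = ((R.foldl (fun (st : Int × List Int) k =>
          (PySem.Int.mod st.1 (PySem.List.pyGetD SP k 0),
           PySem.List.pySetD st.2 k (PySem.Int.floordiv st.1 (PySem.List.pyGetD SP k 0)))) (i, pos)).1,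
       p0 :: (R.foldl (fun (st : Int × List Int) k =>
          (PySem.Int.mod st.1 (PySem.List.pyGetD SP k 0),
           PySem.List.pySetD st.2 k (PySem.Int.floordiv st.1 (PySem.List.pyGetD SP k 0)))) (i, pos)).2) := by
  induction R with
  | nil => intro i p0 pos; rfl
  | cons k R' ih =>
    intro i p0 pos
    have hk : 0 ≤ k := hR k (by simp)
    simp only [List.foldl_cons]
    rw [pvGetD_cons P0 SP (k + 1) 0 (by omega), pvSetD_cons p0 pos (k + 1) _ (by omega),
      show k + 1 - 1 = k by ring]
    exact ih (fun x hx => hR x (by simp [hx])) _ p0 _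

theorem pvPos_eq : ∀ (shape : List Int) (idx : Int),
    ((PySem.List.pyRange 0 (shape.length : Int) 1).foldl
      (fun (st : Int × List Int) k =>
        (PySem.Int.mod st.1 (PySem.List.pyGetD (pvSP shape) k 0),
         PySem.List.pySetD st.2 k (PySem.Int.floordiv st.1 (PySem.List.pyGetD (pvSP shape) k 0))))
      (idx, List.replicate shape.length 0)).2 = pvDigits idx shape
  | [], idx => by simp [PySem.List.pyRange_one_eq_nil, pvDigits]
  | s0 :: rest, idx => by
    have hcons : PySem.List.pyRange 0 ((s0 :: rest).length : Int) 1
        = 0 :: (PySem.List.pyRange 0 ((rest).length : Int) 1).map (fun k => k + 1) := by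
      rw [show ((s0 :: rest).length : Int) = ((rest).length : Int) + 1 by simp,
        PySem.List.pyRange_one_cons (by omega)]
      congr 1
      exact pvRange_shift 0 ((rest).length : Int)
    rw [hcons]
    simp only [List.foldl_cons, List.foldl_map]
    have h0 : PySem.List.pyGetD (pvSP (s0 :: rest)) 0 0 = rest.prod := by
      rw [show pvSP (s0 :: rest) = rest.prod :: pvSP rest from rfl, PySem.List.pyGetD_zero_cons]
    have h1 : PySem.List.pySetD (List.replicate (s0 :: rest).length (0 : Int)) 0
        (PySem.Int.floordiv idx rest.prod)
        = PySem.Int.floordiv idx rest.prod :: List.replicate rest.length 0 := by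
      rw [PySem.List.pySetD_of_nonneg _ _ le_rfl]
      rfl
    rw [h0, h1, show pvSP (s0 :: rest) = rest.prod :: pvSP rest from rfl,
      pvPos_shift rest.prod (pvSP rest) (PySem.List.pyRange 0 ((rest).length : Int) 1)
        (fun k hk => ((PySem.List.mem_pyRange_one).1 hk).1),
      pvPos_eq rest (PySem.Int.mod idx rest.prod)]
    rfl

theorem pvA_eq_digits (idx : Int) (shape : List Int) :
    index_to_position idx shape = pvDigits idx shape := by
  show ((PySem.List.pyRange 0 (shape.length : Int) 1).foldl _
      (idx, List.replicate shape.length 0)).2 = _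
  rw [show ((PySem.List.pyRange ((shape.length : Int) - 1) 0 (-1)).foldl
      (fun ss k => PySem.List.pySetD ss (k - 1)
        (PySem.List.pyGetD ss (k - 1) 0 *
          (PySem.List.pyGetD shape k 0 * PySem.List.pyGetD ss k 0)))
      (List.replicate shape.length 1)) = pvSP shape from pvSS_eq shape]
  exact pvPos_eq shape idx

-- ===== arithmetic: floordiv/mod versus a product of positive divisors =====

theorem pvL1 (a s P : Int) (hs : 0 < s) (hP : 0 < P) :
    PySem.Int.floordiv (PySem.Int.floordiv a P) s = PySem.Int.floordiv a (s * P) := by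
  rw [PySem.Int.floordiv_eq_ediv_of_pos hP, PySem.Int.floordiv_eq_ediv_of_pos hs,
    PySem.Int.floordiv_eq_ediv_of_pos (mul_pos hs hP), Int.ediv_ediv_of_nonneg hP.le, mul_comm]

theorem pvL3 (a s P : Int) (hs : 0 < s) (hP : 0 < P) :
    PySem.Int.mod (PySem.Int.mod a (s * P)) P = PySem.Int.mod a P := by
  rw [PySem.Int.mod_eq_emod_of_pos (mul_pos hs hP), PySem.Int.mod_eq_emod_of_pos hP,
    PySem.Int.mod_eq_emod_of_pos hP]
  exact Int.emod_emod_of_dvd a (dvd_mul_left P s)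

theorem pvL2 (a s P : Int) (hs : 0 < s) (hP : 0 < P) :
    PySem.Int.floordiv (PySem.Int.mod a (s * P)) P = PySem.Int.mod (PySem.Int.floordiv a P) s := by
  rw [PySem.Int.mod_eq_emod_of_pos (mul_pos hs hP), PySem.Int.floordiv_eq_ediv_of_pos hP,
    PySem.Int.floordiv_eq_ediv_of_pos hP, PySem.Int.mod_eq_emod_of_pos hs]
  have hq : a / (s * P) = a / P / s := by rw [mul_comm, ← Int.ediv_ediv_of_nonneg hP.le]
  rw [Int.emod_def a (s * P), hq,
    show a - s * P * (a / P / s) = a + -(s * (a / P / s)) * P by ring,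
    Int.add_mul_ediv_right _ _ hP.ne', Int.emod_def (a / P) s]
  ring

-- ===== B: the right-to-left divmod chain computes pvDigits =====

theorem pvB_chain : ∀ (rest : List Int) (idx : Int), (∀ s ∈ rest, 0 < s) →
    rest.foldr (fun s (st : Int × List Int) =>
        (PySem.Int.floordiv st.1 s, st.2 ++ [PySem.Int.mod st.1 s])) (idx, [])
    = (PySem.Int.floordiv idx rest.prod, (pvDigits (PySem.Int.mod idx rest.prod) rest).reverse)
  | [], idx, _ => by simp [pvDigits]
  | s :: rest', idx, h => by
    have hs : 0 < s := h s (by simp)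
    have hP : 0 < rest'.prod := List.prod_pos (fun x hx => h x (by simp [hx]))
    rw [List.foldr_cons, pvB_chain rest' idx (fun x hx => h x (by simp [hx]))]
    show (PySem.Int.floordiv (PySem.Int.floordiv idx rest'.prod) s,
          (pvDigits (PySem.Int.mod idx rest'.prod) rest').reverse ++
            [PySem.Int.mod (PySem.Int.floordiv idx rest'.prod) s]) = _
    rw [List.prod_cons, pvL1 idx s rest'.prod hs hP]
    have hdig : pvDigits (PySem.Int.mod idx (s * rest'.prod)) (s :: rest')
        = PySem.Int.mod (PySem.Int.floordiv idx rest'.prod) s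
          :: pvDigits (PySem.Int.mod idx rest'.prod) rest' := by
      show PySem.Int.floordiv (PySem.Int.mod idx (s * rest'.prod)) rest'.prod
          :: pvDigits (PySem.Int.mod (PySem.Int.mod idx (s * rest'.prod)) rest'.prod) rest' = _
      rw [pvL2 idx s rest'.prod hs hP, pvL3 idx s rest'.prod hs hP]
    rw [hdig, List.reverse_cons]

theorem pvB_eq_digits (idx : Int) (shape : List Int) (h : ∀ s ∈ shape, 0 < s) :
    index_to_position_alt idx shape = pvDigits idx shape := by
  cases shape with
  | nil => rfl
  | cons s0 rest =>
    show ((rest.reverse.foldl (fun (st : Int × List Int) s =>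
        (PySem.Int.floordiv st.1 s, st.2 ++ [PySem.Int.mod st.1 s])) (idx, [])).1
      :: (rest.reverse.foldl (fun (st : Int × List Int) s =>
        (PySem.Int.floordiv st.1 s, st.2 ++ [PySem.Int.mod st.1 s])) (idx, [])).2.reverse) = _
    rw [List.foldl_reverse, pvB_chain rest idx (fun x hx => h x (by simp [hx]))]
    simp [pvDigits]

-- ===== VERDICT (by name: the statement is the Claim_ definition above) =====
theorem index_to_position_spec : Claim_equal_index_to_position := by
  intro idx shape _ hpre
  unfold Spec_index_to_position
  rw [pvA_eq_digits, pvB_eq_digits idx shape hpre.1]
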